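-- pv_equiv track=rewrite | github.com/minjundev/Kakao-Coding-Test | Level 2/13_방금그곡.py | encoding
-- ===== SOURCE A (Python) =====
-- def encoding(string) :
--     index = 0
--     dict = {'C':'a', 'C#':'b', 'D':'c', 'D#':'d', 'E':'e', 'F':'f', 'F#':'g', 'G':'h', 'G#':'i', 'A':'j', 'A#':'k', 'B':'l', 'E#':'m'}
--     new_string = ''
--     while index < len(string)-1 : # ensure index over
--         token = string[index]
--         if string[index+1] == '#' :
--             token += '#'
--             index += 1
--         new_string += dict[token]
--         index += 1
--     if index < len(string) :
--         new_string += dict[string[index]]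
--     return new_string
-- ===== SOURCE B (Python) =====
-- def encoding(string):
--     base = {'C': 'a', 'D': 'c', 'E': 'e', 'F': 'f', 'G': 'h', 'A': 'j', 'B': 'l'}
--     sharp = {'a': 'b', 'c': 'd', 'e': 'm', 'f': 'g', 'h': 'i', 'j': 'k'}
--     out = []
--     for ch in string:
--         if ch == '#':
--             out[-1] = sharp[out[-1]]
--         else:
--             out.append(base[ch])
--     return ''.join(out)
-- ===== Notes on version B (the rewrite author's own statement) =====
-- stated objective: simpler
-- what changed: B replaces A's index scan with one-character lookahead and a trailing-character special case by a single forward fold: every note char is mapped immediately and a '#' just re-maps the previously emitted output char through a small sharp table.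
import Mathlib
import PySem

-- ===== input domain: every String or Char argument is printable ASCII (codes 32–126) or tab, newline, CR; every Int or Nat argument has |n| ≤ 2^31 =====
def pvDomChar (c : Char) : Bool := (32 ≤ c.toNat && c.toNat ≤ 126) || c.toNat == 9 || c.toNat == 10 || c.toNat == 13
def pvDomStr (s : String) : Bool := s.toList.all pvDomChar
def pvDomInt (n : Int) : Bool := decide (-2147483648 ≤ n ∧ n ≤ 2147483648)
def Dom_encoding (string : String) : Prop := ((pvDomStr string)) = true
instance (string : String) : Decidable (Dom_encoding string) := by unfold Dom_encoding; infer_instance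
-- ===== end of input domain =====

-- B re-implements A as a single forward fold that maps each note at once and lets '#' re-map the last emitted char; objective: simpler.

-- ===== PORT A =====
-- A's note→char dict, as a PySem association dict (insertion order as in A)
def pvNoteDict : PySem.Dict String String :=
  PySem.Dict.ofList [("C","a"), ("C#","b"), ("D","c"), ("D#","d"), ("E","e"), ("F","f"),
   ("F#","g"), ("G","h"), ("G#","i"), ("A","j"), ("A#","k"), ("B","l"), ("E#","m")]

-- A's while loop over `index`, as the obvious structural recursion on the remaining characters:
-- loop condition `index < len(string)-1` ⟺ at least two chars remain; the lookahead `string[index+1] == '#'`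
-- is the second remaining char; `dict[token]` raises KeyError on a miss (outside Pre_), ported as getD "".
def pvEncLoop (rest : List Char) (new_string : String) : String :=
  match rest with
  | c :: d :: rest' =>
      if d = '#' then
        pvEncLoop rest' (new_string ++ (pvNoteDict.get? (String.ofList [c, '#'])).getD "")
      else
        pvEncLoop (d :: rest') (new_string ++ (pvNoteDict.get? (String.ofList [c])).getD "")
  | [c] => new_string ++ (pvNoteDict.get? (String.ofList [c])).getD ""
  | [] => new_string

def encoding (string : String) : String := pvEncLoop string.toList ""

-- ===== PORT B =====
-- B's base-note table and sharp table (output char of X ↦ output char of X#)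
def pvBase (c : Char) : Char :=
  if c = 'C' then 'a' else if c = 'D' then 'c' else if c = 'E' then 'e'
  else if c = 'F' then 'f' else if c = 'G' then 'h' else if c = 'A' then 'j'
  else if c = 'B' then 'l' else ' '   -- KeyError in Python, outside Pre_

def pvSharp (c : Char) : Char :=
  if c = 'a' then 'b' else if c = 'c' then 'd' else if c = 'e' then 'm'
  else if c = 'f' then 'g' else if c = 'h' then 'i' else if c = 'j' then 'k'
  else ' '   -- KeyError in Python, outside Pre_

-- B's list `out` is kept in reverse (head = out[-1]); on '#' the head is re-mapped, else the base char is pushed.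
def pvStep (out : List Char) (ch : Char) : List Char :=
  if ch = '#' then
    match out with
    | [] => []          -- out[-1] raises IndexError in Python, outside Pre_
    | last :: rest => pvSharp last :: rest
  else
    pvBase ch :: out

def encoding_alt (string : String) : String :=
  String.ofList ((string.toList.foldl pvStep []).reverse)

-- ===== PRECONDITION & SPEC =====
-- Pre_ admits exactly the strings A returns on: sequences of the dict's tokens under A's greedy pairing
-- (a '#' always attaches to the immediately preceding char; 'B#' is not a key). Elsewhere A raises
-- KeyError (and B raises KeyError/IndexError), so those inputs are excluded.
def pvIsNote (c : Char) : Bool :=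
  c = 'C' || c = 'D' || c = 'E' || c = 'F' || c = 'G' || c = 'A' || c = 'B'

def pvOkTok : List Char → Bool
  | [] => true
  | [c] => pvIsNote c
  | c :: d :: rest =>
      if d = '#' then pvIsNote c && !(c = 'B') && pvOkTok rest
      else pvIsNote c && pvOkTok (d :: rest)

def Pre_encoding (string : String) : Prop := pvOkTok string.toList = true
instance (string : String) : Decidable (Pre_encoding string) := by unfold Pre_encoding; infer_instance

def pvWitness_encoding : String := "C#DG#AE#B"

def Spec_encoding (string : String) (out : String) : Prop := out = encoding_alt string
instance (string : String) (out : String) : Decidable (Spec_encoding string out) := by unfold Spec_encoding; infer_instance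

-- ===== CLAIM (what is proved, stated in full; the proofs are below) =====
def Claim_equal_encoding : Prop := ∀ (string : String), Dom_encoding string → Pre_encoding string → Spec_encoding string (encoding string)

-- ===== LEMMAS AND PROOFS =====

lemma pvNote_ne_hash (c : Char) (h : pvIsNote c = true) : c ≠ '#' := by
  simp only [pvIsNote, Bool.or_eq_true, decide_eq_true_eq] at h
  rcases h with ((((((h|h)|h)|h)|h)|h)|h) <;> subst h <;> decide

lemma pvOk_cons_hash {c : Char} {rest : List Char}
    (h : pvOkTok (c :: '#' :: rest) = true) :
    pvIsNote c = true ∧ c ≠ 'B' ∧ pvOkTok rest = true := by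
  rw [pvOkTok, if_pos rfl] at h
  simp only [Bool.and_eq_true, Bool.not_eq_true', decide_eq_false_iff_not] at h
  exact ⟨h.1.1, h.1.2, h.2⟩

lemma pvOk_cons {c d : Char} {rest : List Char} (hd : d ≠ '#')
    (h : pvOkTok (c :: d :: rest) = true) :
    pvIsNote c = true ∧ pvOkTok (d :: rest) = true := by
  rw [pvOkTok, if_neg hd] at h
  simpa only [Bool.and_eq_true] using h

lemma pvStep_note (x : List Char) (c : Char) (hc : pvIsNote c = true) :
    pvStep x c = pvBase c :: x := by
  simp [pvStep, if_neg (pvNote_ne_hash c hc)]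

-- on a valid token string the fold never reaches below its starting accumulator
lemma pvFold_split (cs : List Char) :
    pvOkTok cs = true → ∀ x : List Char,
      cs.foldl pvStep x = cs.foldl pvStep [] ++ x := by
  induction cs using pvOkTok.induct with
  | case1 => intro _ x; simp
  | case2 c =>
      intro h x
      rw [pvOkTok] at h
      simp [List.foldl, pvStep_note _ _ h]
  | case3 c rest ih =>
      intro h x
      obtain ⟨hc, _, hrest⟩ := pvOk_cons_hash h
      show List.foldl pvStep (pvStep (pvStep x c) '#') rest
         = List.foldl pvStep (pvStep (pvStep [] c) '#') rest ++ x
      rw [pvStep_note _ _ hc, pvStep_note _ _ hc]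
      show List.foldl pvStep (pvSharp (pvBase c) :: x) rest
         = List.foldl pvStep [pvSharp (pvBase c)] rest ++ x
      rw [ih hrest (pvSharp (pvBase c) :: x), ih hrest [pvSharp (pvBase c)]]
      simp
  | case4 c d rest hd ih =>
      intro h x
      obtain ⟨hc, hrest⟩ := pvOk_cons hd h
      show List.foldl pvStep (pvStep x c) (d :: rest)
         = List.foldl pvStep (pvStep [] c) (d :: rest) ++ x
      rw [pvStep_note _ _ hc, pvStep_note _ _ hc,
          ih hrest (pvBase c :: x), ih hrest [pvBase c]]
      simp

lemma pvOfList_cons (y : Char) (v : List Char) :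
    String.ofList (y :: v) = String.singleton y ++ String.ofList v := by
  rw [show y :: v = [y] ++ v from rfl, String.ofList_append]; rfl

lemma pvEncLoop_fold (cs : List Char) :
    pvOkTok cs = true → ∀ s : String,
      pvEncLoop cs s = s ++ String.ofList ((cs.foldl pvStep []).reverse) := by
  induction cs using pvOkTok.induct with
  | case1 => intro _ s; simp [pvEncLoop]
  | case2 c =>
      intro h s
      rw [pvOkTok] at h
      rw [pvEncLoop, List.foldl_cons, pvStep_note _ _ h, List.foldl_nil]
      simp only [List.reverse_cons, List.reverse_nil, List.nil_append, pvOfList_cons]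
      simp only [pvIsNote, Bool.or_eq_true, decide_eq_true_eq] at h
      rcases h with ((((((h|h)|h)|h)|h)|h)|h) <;> subst h <;> congr 1
  | case3 c rest ih =>
      intro h s
      obtain ⟨hc, hB, hrest⟩ := pvOk_cons_hash h
      rw [pvEncLoop, if_pos rfl, ih hrest]
      have hf : List.foldl pvStep [] (c :: '#' :: rest)
              = List.foldl pvStep [] rest ++ [pvSharp (pvBase c)] := by
        show List.foldl pvStep (pvStep (pvStep [] c) '#') rest = _
        rw [pvStep_note _ _ hc]
        exact pvFold_split rest hrest [pvSharp (pvBase c)]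
      rw [hf, List.reverse_append, List.reverse_singleton, List.singleton_append]
      conv_rhs => rw [pvOfList_cons]
      rw [← String.append_assoc]
      congr 1
      simp only [pvIsNote, Bool.or_eq_true, decide_eq_true_eq] at hc
      rcases hc with ((((((h|h)|h)|h)|h)|h)|h) <;> first
        | exact absurd h hB
        | (subst h; congr 1)
  | case4 c d rest hd ih =>
      intro h s
      obtain ⟨hc, hrest⟩ := pvOk_cons hd h
      rw [pvEncLoop, if_neg hd, ih hrest]
      have hf : List.foldl pvStep [] (c :: d :: rest)
              = List.foldl pvStep [] (d :: rest) ++ [pvBase c] := by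
        show List.foldl pvStep (pvStep [] c) (d :: rest) = _
        rw [pvStep_note _ _ hc]
        exact pvFold_split (d :: rest) hrest [pvBase c]
      rw [hf, List.reverse_append, List.reverse_singleton, List.singleton_append]
      conv_rhs => rw [pvOfList_cons]
      rw [← String.append_assoc]
      congr 1
      simp only [pvIsNote, Bool.or_eq_true, decide_eq_true_eq] at hc
      rcases hc with ((((((h|h)|h)|h)|h)|h)|h) <;> subst h <;> congr 1

-- ===== VERDICT (by name: the statement is the Claim_ definition above) =====
theorem encoding_spec : Claim_equal_encoding := by
  intro s _ hpre
  unfold Spec_encoding encoding encoding_alt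
  rw [pvEncLoop_fold s.toList hpre ""]
  simp
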